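-- pv_equiv track=rewrite | github.com/r00tman/DynEventNeRF | ddp_model.py | remap_name
-- ===== SOURCE A (Python) =====
-- def remap_name(name):
--     name = name.replace('.', '-')  # dot is not allowed by pytorch
--     if name[-1] == '/':
--         name = name[:-1]
--     idx = name.rfind('/')
--     for _ in range(2):
--         if idx >= 0:
--             idx = name[:idx].rfind('/')
--     return name[idx + 1:]
-- ===== SOURCE B (Python) =====
-- def remap_name(name):
--     name = name.replace('.', '-')  # dot is not allowed by pytorch
--     if name.endswith('/'):
--         name = name[:-1]
--     return '/'.join(name.split('/')[-3:])
-- ===== Notes on version B (the rewrite author's own statement) =====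
-- stated objective: idiomatic
-- what changed: A locates the third-from-last '/' by three successive backward rfind scans over shrinking prefixes; B tokenizes once with name.split('/') and joins the last three components ('/'.join(parts[-3:])).
import Mathlib
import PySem

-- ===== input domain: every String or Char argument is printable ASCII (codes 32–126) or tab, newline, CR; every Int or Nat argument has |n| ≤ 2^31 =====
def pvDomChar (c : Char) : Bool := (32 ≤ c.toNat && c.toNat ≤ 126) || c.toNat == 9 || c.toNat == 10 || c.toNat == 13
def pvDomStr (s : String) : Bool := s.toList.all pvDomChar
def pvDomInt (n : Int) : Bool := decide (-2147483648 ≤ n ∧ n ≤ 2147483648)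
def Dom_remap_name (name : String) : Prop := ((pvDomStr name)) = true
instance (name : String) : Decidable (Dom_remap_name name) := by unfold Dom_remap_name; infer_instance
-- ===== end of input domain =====

-- B replaces A's three backward rfind scans by split('/') + join of the last three components (idiomatic; same behaviour, not claimed faster).

-- ===== PORT A =====
def remap_name (name : String) : String :=
  let cs := PySem.Chars.replace name.toList ['.'] ['-']
  let cs := if PySem.List.pyGet? cs (-1) = some '/' then PySem.List.slice cs none (some (-1)) else cs
  let idx := PySem.Chars.rfind cs ['/']
  let idx := (PySem.List.pyRange 0 2 1).foldl
    (fun idx _ => if idx ≥ 0 then PySem.Chars.rfind (PySem.List.slice cs none (some idx)) ['/'] else idx) idx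
  String.ofList (PySem.List.slice cs (some (idx + 1)) none)

-- ===== PORT B =====
def remap_name_alt (name : String) : String :=
  let cs := PySem.Chars.replace name.toList ['.'] ['-']
  let cs := if PySem.Chars.endswith cs ['/'] then PySem.List.slice cs none (some (-1)) else cs
  let parts := PySem.Chars.splitOn cs ['/']
  String.ofList (PySem.Chars.join ['/'] (PySem.List.slice parts (some (-3)) none))

-- ===== PRECONDITION & SPEC =====
-- Pre_ excludes only the empty string, on which Python A raises IndexError at name[-1].
def Pre_remap_name (name : String) : Prop := name ≠ ""
instance (name : String) : Decidable (Pre_remap_name name) := by unfold Pre_remap_name; infer_instance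
def pvWitness_remap_name : String := "a/b/c/d.txt"

def Spec_remap_name (name : String) (out : String) : Prop := out = remap_name_alt name
instance (name : String) (out : String) : Decidable (Spec_remap_name name out) := by unfold Spec_remap_name; infer_instance

-- ===== CLAIM (what is proved, stated in full; the proofs are below) =====
def Claim_equal_remap_name : Prop := ∀ (name : String), Dom_remap_name name → Pre_remap_name name → Spec_remap_name name (remap_name name)

-- ===== LEMMAS AND PROOFS =====

def mySplit : List Char → List (List Char)
  | [] => [[]]
  | x :: t => if x = '/' then [] :: mySplit t
              else match mySplit t with
                   | [] => [[x]]
                   | p :: r => (x :: p) :: r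

def consCat (pre : List Char) : List (List Char) → List (List Char)
  | [] => [pre]
  | p :: r => (pre ++ p) :: r

lemma mySplit_ne_nil : ∀ l : List Char, mySplit l ≠ []
  | [] => by simp [mySplit]
  | x :: t => by
      simp only [mySplit]
      split_ifs
      · simp
      · cases h : mySplit t <;> simp

lemma mySplit_cons_exists (l : List Char) : ∃ p r, mySplit l = p :: r := by
  cases hm : mySplit l with
  | nil => exact absurd hm (mySplit_ne_nil l)
  | cons p r => exact ⟨p, r, rfl⟩

lemma isPrefixOf_slash (s : List Char) : List.isPrefixOf ['/'] s = true ↔ ∃ t, s = '/' :: t := by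
  cases s with
  | nil => simp [List.isPrefixOf]
  | cons x t =>
    rw [List.isPrefixOf_iff_prefix, List.cons_prefix_cons]
    simp [eq_comm]

lemma go_zero (l cur : List Char) (acc : List (List Char)) :
    PySem.Chars.splitOn.go ['/'] 0 l cur acc = ((cur.reverse ++ l) :: acc).reverse := by
  rw [PySem.Chars.splitOn.go]

lemma go_succ_nil (fuel : Nat) (cur : List Char) (acc : List (List Char)) :
    PySem.Chars.splitOn.go ['/'] (fuel + 1) [] cur acc = (cur.reverse :: acc).reverse := by
  rw [PySem.Chars.splitOn.go]; simp

lemma go_succ_cons (fuel : Nat) (x : Char) (rest cur : List Char) (acc : List (List Char)) :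
    PySem.Chars.splitOn.go ['/'] (fuel + 1) (x :: rest) cur acc =
      if x = '/' then PySem.Chars.splitOn.go ['/'] fuel rest [] (cur.reverse :: acc)
      else PySem.Chars.splitOn.go ['/'] fuel rest (x :: cur) acc := by
  rw [PySem.Chars.splitOn.go]
  by_cases hx : x = '/'
  · subst hx
    have hpre : List.isPrefixOf ['/'] ('/' :: rest) = true := (isPrefixOf_slash _).mpr ⟨rest, rfl⟩
    rw [hpre]
    simp
  · have hpre : List.isPrefixOf ['/'] (x :: rest) = false := by
      rw [Bool.eq_false_iff]
      intro hc
      obtain ⟨t, ht⟩ := (isPrefixOf_slash _).mp hc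
      exact hx (by injection ht)
    rw [hpre]
    simp [hx]

lemma splitOn_go_eq : ∀ (fuel : Nat) (l cur : List Char) (acc : List (List Char)), l.length ≤ fuel →
    PySem.Chars.splitOn.go ['/'] fuel l cur acc = acc.reverse ++ consCat cur.reverse (mySplit l) := by
  intro fuel
  induction fuel with
  | zero =>
    intro l cur acc h
    have hl : l = [] := by cases l <;> simp_all
    subst hl
    rw [go_zero]
    simp [mySplit, consCat]
  | succ fuel ih =>
    intro l cur acc h
    cases l with
    | nil =>
      rw [go_succ_nil]
      simp [mySplit, consCat]
    | cons x rest =>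
      rw [go_succ_cons]
      simp only [List.length_cons] at h
      obtain ⟨p, r, hpr⟩ := mySplit_cons_exists rest
      by_cases hx : x = '/'
      · subst hx
        rw [if_pos rfl, ih _ _ _ (by omega)]
        simp [mySplit, consCat, hpr]
      · rw [if_neg hx, ih _ _ _ (by omega)]
        simp [mySplit, consCat, hpr, hx]

lemma splitOn_eq (l : List Char) : PySem.Chars.splitOn l ['/'] = mySplit l := by
  show PySem.Chars.splitOn.go ['/'] (l.length + 1) l [] [] = _
  rw [splitOn_go_eq _ _ _ _ (by omega)]
  obtain ⟨p, r, hpr⟩ := mySplit_cons_exists l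
  simp [consCat, hpr]
lemma rgo_zero (s : List Char) :
    PySem.Chars.rfind.go s ['/'] 0 = if List.isPrefixOf ['/'] s then 0 else -1 := by
  rw [PySem.Chars.rfind.go]

lemma rgo_succ (s : List Char) (j : Nat) : PySem.Chars.rfind.go s ['/'] (j + 1) =
    if List.isPrefixOf ['/'] (s.drop (j + 1)) then ((j : Int) + 1) else PySem.Chars.rfind.go s ['/'] j := by
  rw [PySem.Chars.rfind.go]
  push_cast
  ring_nf

lemma rfind_go_bound (s : List Char) : ∀ j : Nat, -1 ≤ PySem.Chars.rfind.go s ['/'] j ∧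
    PySem.Chars.rfind.go s ['/'] j + 1 ≤ (s.length : Int) := by
  intro j
  induction j with
  | zero =>
    rw [rgo_zero]
    split_ifs with h
    · obtain ⟨t, ht⟩ := (isPrefixOf_slash _).mp h
      subst ht
      refine ⟨by omega, by simp⟩
    · constructor <;> simp
  | succ j ih =>
    rw [rgo_succ]
    split_ifs with h
    · obtain ⟨t, ht⟩ := (isPrefixOf_slash _).mp h
      have : ¬ s.length ≤ j + 1 := by
        intro hle
        rw [List.drop_eq_nil_iff.mpr hle] at ht
        exact List.cons_ne_nil _ _ ht.symm
      constructor <;> [omega; (push_cast; omega)]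
    · exact ih

lemma rfind_bound (s : List Char) : -1 ≤ PySem.Chars.rfind s ['/'] ∧
    PySem.Chars.rfind s ['/'] + 1 ≤ (s.length : Int) := rfind_go_bound s s.length

lemma rfind_go_not_mem {s : List Char} (h : '/' ∉ s) : ∀ j : Nat, PySem.Chars.rfind.go s ['/'] j = -1 := by
  intro j
  have hpre : ∀ n : Nat, List.isPrefixOf ['/'] (s.drop n) = false := by
    intro n
    rw [Bool.eq_false_iff]
    intro hc
    obtain ⟨t, ht⟩ := (isPrefixOf_slash _).mp hc
    exact h (List.mem_of_mem_drop (l := s) (i := n) (by rw [ht]; simp))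
  induction j with
  | zero => rw [rgo_zero]; have := hpre 0; simp at this; simp [this]
  | succ j ih => rw [rgo_succ, hpre (j + 1)]; simpa using ih

lemma rfind_not_mem {s : List Char} (h : '/' ∉ s) : PySem.Chars.rfind s ['/'] = -1 :=
  rfind_go_not_mem h s.length

lemma rfind_go_last {a b : List Char} (hb : '/' ∉ b) :
    ∀ k : Nat, PySem.Chars.rfind.go (a ++ '/' :: b) ['/'] (a.length + k) = (a.length : Int) := by
  intro k
  induction k with
  | zero =>
    have hpre : List.isPrefixOf ['/'] ((a ++ '/' :: b).drop a.length) = true := by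
      rw [List.drop_left]
      exact (isPrefixOf_slash _).mpr ⟨b, rfl⟩
    cases ha : a.length with
    | zero =>
      rw [ha] at hpre
      simp only [List.drop_zero] at hpre
      rw [rgo_zero]
      simp [hpre]
    | succ m =>
      rw [ha] at hpre
      rw [rgo_succ]
      simp only [hpre, if_true]
      push_cast
      ring
  | succ k ih =>
    have : a.length + (k + 1) = (a.length + k) + 1 := by omega
    rw [this, rgo_succ]
    have hdrop : (a ++ '/' :: b).drop (a.length + k + 1) = b.drop k := by
      have : a.length + k + 1 = (a ++ ['/']).length + k := by simp; omega
      rw [this, show a ++ '/' :: b = (a ++ ['/']) ++ b by simp, List.drop_append]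
      simp
    have hpre : List.isPrefixOf ['/'] ((a ++ '/' :: b).drop (a.length + k + 1)) = false := by
      rw [Bool.eq_false_iff]
      intro hc
      obtain ⟨t, ht⟩ := (isPrefixOf_slash _).mp hc
      rw [hdrop] at ht
      exact hb (List.mem_of_mem_drop (l := b) (i := k) (by rw [ht]; simp))
    rw [hpre]
    simpa using ih

lemma rfind_last {a b : List Char} (hb : '/' ∉ b) :
    PySem.Chars.rfind (a ++ '/' :: b) ['/'] = (a.length : Int) := by
  show PySem.Chars.rfind.go _ _ _ = _
  have : (a ++ '/' :: b).length = a.length + (b.length + 1) := by simp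
  rw [this]
  exact rfind_go_last hb _

def stepA (cs : List Char) (i : Int) : Int :=
  if i ≥ 0 then PySem.Chars.rfind (PySem.List.slice cs none (some i)) ['/'] else i

def chain (cs : List Char) : Nat → Int
  | 0 => PySem.Chars.rfind cs ['/']
  | k + 1 => stepA cs (chain cs k)

lemma mySplit_not_mem : ∀ {l : List Char}, '/' ∉ l → mySplit l = [l]
  | [], _ => rfl
  | x :: t, h => by
      have hx : ¬ x = '/' := fun hc => h (by simp [hc])
      have ht : mySplit t = [t] := mySplit_not_mem (fun hc => h (by simp [hc]))
      simp [mySplit, hx, ht]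

lemma mySplit_append {b : List Char} (hb : '/' ∉ b) : ∀ a : List Char,
    mySplit (a ++ '/' :: b) = mySplit a ++ [b]
  | [] => by simp [mySplit, mySplit_not_mem hb]
  | x :: a' => by
      by_cases hx : x = '/'
      · subst hx
        simp [mySplit, mySplit_append hb a']
      · obtain ⟨q, qs, hq⟩ := mySplit_cons_exists a'
        have := mySplit_append hb a'
        rw [hq] at this
        simp [mySplit, hx, this, hq]

lemma decomp (cs : List Char) : '/' ∉ cs ∨ ∃ a b, cs = a ++ '/' :: b ∧ '/' ∉ b := by
  induction cs using List.reverseRecOn with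
  | nil => left; simp
  | append_singleton ys x ih =>
    by_cases hx : x = '/'
    · subst hx
      right
      exact ⟨ys, [], by simp, by simp⟩
    · rcases ih with h | ⟨a, b, hab, hb⟩
      · left
        intro hc
        rcases List.mem_append.mp hc with h1 | h1
        · exact h h1
        · simp at h1; exact hx h1.symm
      · right
        refine ⟨a, b ++ [x], by simp [hab], ?_⟩
        intro hc
        rcases List.mem_append.mp hc with h1 | h1
        · exact hb h1
        · simp at h1; exact hx h1.symm

lemma join_append_singleton : ∀ (qs : List (List Char)) (b : List Char), qs ≠ [] →
    PySem.Chars.join ['/'] (qs ++ [b]) = PySem.Chars.join ['/'] qs ++ '/' :: b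
  | [], _, h => absurd rfl h
  | [x], b, _ => by simp [PySem.Chars.join, List.intercalate]
  | x :: y :: t, b, _ => by
      have := join_append_singleton (y :: t) b (by simp)
      simp only [PySem.Chars.join, List.intercalate] at this ⊢
      simp [List.intersperse] at this ⊢
      simp [this]

lemma chain_bound (cs : List Char) : ∀ k, -1 ≤ chain cs k ∧ chain cs k + 1 ≤ (cs.length : Int) := by
  intro k
  induction k with
  | zero => exact rfind_bound cs
  | succ k ih =>
    have heq : chain cs (k + 1) = stepA cs (chain cs k) := rfl
    rw [heq]
    unfold stepA
    split_ifs with h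
    · rw [PySem.List.slice_to cs h]
      have hb := rfind_bound (cs.take (chain cs k).toNat)
      have hlen : ((cs.take (chain cs k).toNat).length : Int) ≤ (cs.length : Int) := by
        simp
      exact ⟨hb.1, le_trans hb.2 hlen⟩
    · exact ih

lemma chain_not_mem {cs : List Char} (h : '/' ∉ cs) : ∀ k, chain cs k = -1 := by
  intro k
  induction k with
  | zero => exact rfind_not_mem h
  | succ k ih =>
    show stepA cs (chain cs k) = -1
    rw [ih]
    simp [stepA]

lemma stepA_extend {a : List Char} (r : List Char) {i : Int} (_h1 : -1 ≤ i) (h2 : i ≤ (a.length : Int)) :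
    stepA (a ++ r) i = stepA a i := by
  unfold stepA
  split_ifs with h
  · rw [PySem.List.slice_to (a ++ r) h, PySem.List.slice_to a h, List.take_append_of_le_length]
    omega
  · rfl

lemma chain_shift {a b : List Char} (hb : '/' ∉ b) :
    ∀ k, chain (a ++ '/' :: b) (k + 1) = chain a k := by
  intro k
  induction k with
  | zero =>
    show stepA _ (chain _ 0) = _
    show stepA _ (PySem.Chars.rfind _ _) = _
    rw [rfind_last hb]
    unfold stepA
    rw [if_pos (by positivity)]
    rw [PySem.List.slice_to _ (by positivity)]
    simp
    rfl
  | succ k ih =>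
    show stepA _ (chain _ (k + 1)) = _
    rw [ih]
    have hbnd := chain_bound a k
    exact stepA_extend ('/' :: b) hbnd.1 (by omega)

lemma key : ∀ (n : Nat) (cs : List Char), cs.length ≤ n → ∀ k : Nat,
    cs.drop (chain cs k + 1).toNat =
      PySem.Chars.join ['/'] ((mySplit cs).drop ((mySplit cs).length - (k + 1))) := by
  intro n
  induction n with
  | zero =>
    intro cs hlen k
    have : cs = [] := by cases cs <;> simp_all
    subst this
    rw [chain_not_mem (by simp) k]
    simp [mySplit, PySem.Chars.join, List.intercalate]
  | succ n ih =>
    intro cs hlen k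
    rcases decomp cs with h | ⟨a, b, hab, hb⟩
    · rw [chain_not_mem h k, mySplit_not_mem h]
      simp [PySem.Chars.join, List.intercalate]
    · subst hab
      rw [mySplit_append hb]
      cases k with
      | zero =>
        show List.drop (chain _ 0 + 1).toNat _ = _
        show List.drop (PySem.Chars.rfind _ _ + 1).toNat _ = _
        rw [rfind_last hb]
        have h1 : ((a.length : Int) + 1).toNat = a.length + 1 := by omega
        rw [h1]
        have h2 : List.drop (a.length + 1) (a ++ '/' :: b) = b := by
          rw [show a ++ '/' :: b = (a ++ ['/']) ++ b by simp,
              show a.length + 1 = (a ++ ['/']).length by simp]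
          exact List.drop_left
        rw [h2]
        obtain ⟨p, r, hp⟩ := mySplit_cons_exists a
        have hL : (mySplit a ++ [b]).length - 1 = (mySplit a).length := by simp
        rw [hL, List.drop_append_of_le_length (le_refl _)]
        simp [PySem.Chars.join, List.intercalate]
      | succ k =>
        rw [chain_shift hb k]
        have hlen' : a.length ≤ n := by
          simp at hlen
          omega
        have hIH := ih a hlen' k
        have hbnd := chain_bound a k
        have ht : (chain a k + 1).toNat ≤ a.length := by omega
        rw [List.drop_append_of_le_length ht, hIH]
        set L := (mySplit a).length with hLdef
        have hL1 : 1 ≤ L := by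
          obtain ⟨p, r, hp⟩ := mySplit_cons_exists a
          simp [hLdef, hp]
        have harith : (mySplit a ++ [b]).length - (k + 1 + 1) = L - (k + 1) := by
          simp [hLdef]
        rw [harith]
        have hle : L - (k + 1) ≤ L := by omega
        rw [List.drop_append_of_le_length hle]
        have hne : (mySplit a).drop (L - (k + 1)) ≠ [] := by
          intro hc
          rw [List.drop_eq_nil_iff] at hc
          omega
        rw [join_append_singleton _ b hne]

lemma cond_eq (cs : List Char) :
    (PySem.List.pyGet? cs (-1) = some '/') ↔ (PySem.Chars.endswith cs ['/'] = true) := by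
  rw [PySem.List.pyGet?_neg_one, PySem.Chars.endswith_iff]
  simp [List.getLast?_eq_some_iff, List.IsSuffix, eq_comm]

lemma core (cs : List Char) :
    PySem.List.slice cs (some ((PySem.List.pyRange 0 2 1).foldl
      (fun idx _ => if idx ≥ 0 then PySem.Chars.rfind (PySem.List.slice cs none (some idx)) ['/'] else idx)
      (PySem.Chars.rfind cs ['/']) + 1)) none =
    PySem.Chars.join ['/'] (PySem.List.slice (PySem.Chars.splitOn cs ['/']) (some (-3)) none) := by
  have hr : PySem.List.pyRange 0 2 1 = [0, 1] := by decide
  rw [hr]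
  have hfold : ([0, 1] : List Int).foldl
      (fun idx _ => if idx ≥ 0 then PySem.Chars.rfind (PySem.List.slice cs none (some idx)) ['/'] else idx)
      (PySem.Chars.rfind cs ['/']) = chain cs 2 := rfl
  rw [hfold]
  have hb := chain_bound cs 2
  rw [PySem.List.slice_from cs (show (0 : Int) ≤ chain cs 2 + 1 by omega)]
  rw [splitOn_eq, PySem.List.slice_from_neg_ofNat (mySplit cs) 3 (by omega)]
  have hk := key cs.length cs le_rfl 2
  norm_num at hk
  exact hk

-- ===== VERDICT (by name: the statement is the Claim_ definition above) =====
theorem remap_name_spec : Claim_equal_remap_name := by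
  intro name _ _
  show remap_name name = remap_name_alt name
  simp only [remap_name, remap_name_alt]
  have hcond := cond_eq (PySem.Chars.replace name.toList ['.'] ['-'])
  by_cases h : PySem.List.pyGet? (PySem.Chars.replace name.toList ['.'] ['-']) (-1) = some '/'
  · rw [if_pos h, if_pos (hcond.mp h)]
    exact congrArg String.ofList (core _)
  · rw [if_neg h, if_neg (fun hc => h (hcond.mpr hc))]
    exact congrArg String.ofList (core _)
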